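-- pv_equiv track=rewrite | github.com/danieleschmidt/Smell-Diffusion-Generator | smell_diffusion/research/research_orchestrator.py | _design_evaluation_framework
-- ===== SOURCE A (Python) =====
-- from typing import Dict, List, Any, Optional, Callable, Union
--
-- def _design_evaluation_framework(metrics: List[str]) -> Dict[str, Any]:
--     """Design comprehensive evaluation framework."""
--
--     framework = {
--         'primary_metrics': [],
--         'secondary_metrics': [],
--         'research_metrics': [],
--         'statistical_tests': []
--     }
--
--     # Categorize metrics
--     primary_metrics = ['validity', 'safety', 'relevance']
--     secondary_metrics = ['novelty', 'diversity', 'complexity']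
--     research_metrics = ['innovation_index', 'reproducibility_score', 'publication_impact']
--
--     for metric in metrics:
--         if metric in primary_metrics:
--             framework['primary_metrics'].append(metric)
--         elif metric in secondary_metrics:
--             framework['secondary_metrics'].append(metric)
--         else:
--             framework['research_metrics'].append(metric)
--
--     # Define statistical tests for each metric type
--     framework['statistical_tests'] = [
--         'anova_primary_metrics',
--         'tukey_pairwise_comparisons',
--         'effect_size_calculations',
--         'bootstrap_confidence_intervals',
--         'non_parametric_alternatives'
--     ]
--
--     return framework
-- ===== SOURCE B (Python) =====
-- def _design_evaluation_framework(metrics):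
--     """Design comprehensive evaluation framework."""
--     bucket = {'validity': 0, 'safety': 0, 'relevance': 0,
--               'novelty': 1, 'diversity': 1, 'complexity': 1}
--     # decorate: tag every metric with its bucket index (2 = research by default)
--     tagged = [(bucket.get(m, 2), m) for m in metrics]
--     # group: collect each bucket from the tagged stream
--     primary, secondary, research = ([m for i, m in tagged if i == j]
--                                     for j in range(3))
--     return {
--         'primary_metrics': primary,
--         'secondary_metrics': secondary,
--         'research_metrics': research,
--         'statistical_tests': [
--             'anova_primary_metrics',
--             'tukey_pairwise_comparisons',
--             'effect_size_calculations',
--             'bootstrap_confidence_intervals',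
--             'non_parametric_alternatives'
--         ],
--     }
-- ===== Notes on version B (the rewrite author's own statement) =====
-- stated objective: alternative
-- what changed: Replaces the single if/elif membership-test loop appending into a mutable dict with a decorate-then-group pipeline: each metric is first tagged with a bucket index from a precomputed map, then the three buckets are collected from the tagged stream by index.
import Mathlib
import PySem

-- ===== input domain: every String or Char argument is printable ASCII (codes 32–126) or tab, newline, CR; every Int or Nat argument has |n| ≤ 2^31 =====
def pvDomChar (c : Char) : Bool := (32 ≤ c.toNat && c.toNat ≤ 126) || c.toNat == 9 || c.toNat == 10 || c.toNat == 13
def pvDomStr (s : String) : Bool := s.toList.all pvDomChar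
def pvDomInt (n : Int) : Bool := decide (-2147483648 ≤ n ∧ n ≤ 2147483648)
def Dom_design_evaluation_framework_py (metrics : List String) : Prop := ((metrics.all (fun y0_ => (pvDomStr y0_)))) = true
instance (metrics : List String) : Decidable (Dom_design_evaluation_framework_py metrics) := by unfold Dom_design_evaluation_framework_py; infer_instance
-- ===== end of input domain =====

-- B replaces A's if/elif membership-test loop into a mutable dict by a decorate-then-group
-- pipeline: tag each metric with a bucket index from a precomputed map, then collect the buckets by index (objective: alternative).
-- ===== PORT A =====
def design_evaluation_framework_py (metrics : List String) : List (String × List String) :=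
  let framework : PySem.Dict String (List String) :=
    PySem.Dict.ofList [("primary_metrics", []), ("secondary_metrics", []),
                       ("research_metrics", []), ("statistical_tests", [])]
  let primary_metrics := ["validity", "safety", "relevance"]
  let secondary_metrics := ["novelty", "diversity", "complexity"]
  let framework := metrics.foldl (fun d metric =>
      if primary_metrics.contains metric then
        d.modify "primary_metrics" [] (· ++ [metric])
      else if secondary_metrics.contains metric then
        d.modify "secondary_metrics" [] (· ++ [metric])
      else
        d.modify "research_metrics" [] (· ++ [metric])) framework
  let framework := framework.insert "statistical_tests"
      ["anova_primary_metrics", "tukey_pairwise_comparisons", "effect_size_calculations",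
       "bootstrap_confidence_intervals", "non_parametric_alternatives"]
  framework.items

-- ===== PORT B =====
def design_evaluation_framework_py_alt (metrics : List String) : List (String × List String) :=
  let bucket : PySem.Dict String Nat :=
    PySem.Dict.ofList [("validity", 0), ("safety", 0), ("relevance", 0),
                       ("novelty", 1), ("diversity", 1), ("complexity", 1)]
  let tagged := metrics.map (fun m => (bucket.getD m 2, m))
  let group := fun (j : Nat) => (tagged.filter (fun p => p.1 == j)).map (fun p => p.2)
  [("primary_metrics", group 0),
   ("secondary_metrics", group 1),
   ("research_metrics", group 2),
   ("statistical_tests",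
    ["anova_primary_metrics", "tukey_pairwise_comparisons", "effect_size_calculations",
     "bootstrap_confidence_intervals", "non_parametric_alternatives"])]

-- ===== PRECONDITION & SPEC =====
def Spec_design_evaluation_framework_py (metrics : List String) (out : List (String × List String)) : Prop := out = design_evaluation_framework_py_alt metrics
instance (metrics : List String) (out : List (String × List String)) : Decidable (Spec_design_evaluation_framework_py metrics out) := by unfold Spec_design_evaluation_framework_py; infer_instance

-- ===== CLAIM =====
def Claim_equal_design_evaluation_framework_py : Prop := ∀ (metrics : List String), Dom_design_evaluation_framework_py metrics → Spec_design_evaluation_framework_py metrics (design_evaluation_framework_py metrics)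


-- ===== LEMMAS AND PROOFS =====
theorem dispatch_loop_items (metrics : List String) (p s r t : List String) :
    (metrics.foldl (fun d metric =>
      if ["validity", "safety", "relevance"].contains metric then
        d.modify "primary_metrics" [] (· ++ [metric])
      else if ["novelty", "diversity", "complexity"].contains metric then
        d.modify "secondary_metrics" [] (· ++ [metric])
      else
        d.modify "research_metrics" [] (· ++ [metric]))
      (PySem.Dict.mk [("primary_metrics", p), ("secondary_metrics", s),
                      ("research_metrics", r), ("statistical_tests", t)])).items
    = [("primary_metrics", p ++ metrics.filter (fun m => ["validity", "safety", "relevance"].contains m)),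
       ("secondary_metrics", s ++ metrics.filter (fun m => ["novelty", "diversity", "complexity"].contains m)),
       ("research_metrics", r ++ metrics.filter (fun m =>
          !(["validity", "safety", "relevance"].contains m) && !(["novelty", "diversity", "complexity"].contains m))),
       ("statistical_tests", t)] := by
  induction metrics generalizing p s r with
  | nil => simp
  | cons m ms ih =>
    by_cases h1 : (["validity", "safety", "relevance"].contains m) = true
    · rw [List.foldl_cons]
      rw [show (if ["validity", "safety", "relevance"].contains m = true then
            (PySem.Dict.mk [("primary_metrics", p), ("secondary_metrics", s),
              ("research_metrics", r), ("statistical_tests", t)]).modify "primary_metrics" [] (· ++ [m])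
          else if ["novelty", "diversity", "complexity"].contains m = true then
            (PySem.Dict.mk [("primary_metrics", p), ("secondary_metrics", s),
              ("research_metrics", r), ("statistical_tests", t)]).modify "secondary_metrics" [] (· ++ [m])
          else
            (PySem.Dict.mk [("primary_metrics", p), ("secondary_metrics", s),
              ("research_metrics", r), ("statistical_tests", t)]).modify "research_metrics" [] (· ++ [m]))
          = PySem.Dict.mk [("primary_metrics", p ++ [m]), ("secondary_metrics", s),
              ("research_metrics", r), ("statistical_tests", t)] from by
        rcases (by simpa using h1 : m = "validity" ∨ m = "safety" ∨ m = "relevance") with rfl | rfl | rfl <;>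
          simp [PySem.Dict.modify, PySem.Dict.insert, PySem.Dict.contains, PySem.Dict.getD, PySem.Dict.get?]]
      rw [ih]
      rcases (by simpa using h1 : m = "validity" ∨ m = "safety" ∨ m = "relevance") with rfl | rfl | rfl <;> simp
    · by_cases h2 : (["novelty", "diversity", "complexity"].contains m) = true
      · rw [List.foldl_cons]
        rw [show (if ["validity", "safety", "relevance"].contains m = true then
              (PySem.Dict.mk [("primary_metrics", p), ("secondary_metrics", s),
                ("research_metrics", r), ("statistical_tests", t)]).modify "primary_metrics" [] (· ++ [m])
            else if ["novelty", "diversity", "complexity"].contains m = true then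
              (PySem.Dict.mk [("primary_metrics", p), ("secondary_metrics", s),
                ("research_metrics", r), ("statistical_tests", t)]).modify "secondary_metrics" [] (· ++ [m])
            else
              (PySem.Dict.mk [("primary_metrics", p), ("secondary_metrics", s),
                ("research_metrics", r), ("statistical_tests", t)]).modify "research_metrics" [] (· ++ [m]))
            = PySem.Dict.mk [("primary_metrics", p), ("secondary_metrics", s ++ [m]),
                ("research_metrics", r), ("statistical_tests", t)] from by
          have h1' : ¬(m = "validity" ∨ m = "safety" ∨ m = "relevance") := by simpa using h1
          rcases (by simpa using h2 : m = "novelty" ∨ m = "diversity" ∨ m = "complexity") with rfl | rfl | rfl <;>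
            simp [PySem.Dict.modify, PySem.Dict.insert, PySem.Dict.contains, PySem.Dict.getD, PySem.Dict.get?]]
        rw [ih]
        rcases (by simpa using h2 : m = "novelty" ∨ m = "diversity" ∨ m = "complexity") with rfl | rfl | rfl <;> simp
      · rw [List.foldl_cons]
        rw [show (if ["validity", "safety", "relevance"].contains m = true then
              (PySem.Dict.mk [("primary_metrics", p), ("secondary_metrics", s),
                ("research_metrics", r), ("statistical_tests", t)]).modify "primary_metrics" [] (· ++ [m])
            else if ["novelty", "diversity", "complexity"].contains m = true then
              (PySem.Dict.mk [("primary_metrics", p), ("secondary_metrics", s),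
                ("research_metrics", r), ("statistical_tests", t)]).modify "secondary_metrics" [] (· ++ [m])
            else
              (PySem.Dict.mk [("primary_metrics", p), ("secondary_metrics", s),
                ("research_metrics", r), ("statistical_tests", t)]).modify "research_metrics" [] (· ++ [m]))
            = PySem.Dict.mk [("primary_metrics", p), ("secondary_metrics", s),
                ("research_metrics", r ++ [m]), ("statistical_tests", t)] from by
          have h1' : ¬(m = "validity" ∨ m = "safety" ∨ m = "relevance") := by simpa using h1
          have h2' : ¬(m = "novelty" ∨ m = "diversity" ∨ m = "complexity") := by simpa using h2
          simp [h1', h2', PySem.Dict.modify, PySem.Dict.insert, PySem.Dict.contains, PySem.Dict.getD, PySem.Dict.get?]]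
        rw [ih]
        have h1' : ¬(m = "validity" ∨ m = "safety" ∨ m = "relevance") := by simpa using h1
        have h2' : ¬(m = "novelty" ∨ m = "diversity" ∨ m = "complexity") := by simpa using h2
        simp at h1' h2'
        simp [h1'.1, h1'.2.1, h1'.2.2, h2'.1, h2'.2.1, h2'.2.2]

-- B's decorate-then-group pipeline computes exactly the three membership filters
theorem tagged_groups (metrics : List String) :
    (let bucket : PySem.Dict String Nat :=
       PySem.Dict.ofList [("validity", 0), ("safety", 0), ("relevance", 0),
                          ("novelty", 1), ("diversity", 1), ("complexity", 1)]
     let tagged := metrics.map (fun m => (bucket.getD m 2, m))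
     (((tagged.filter (fun p => p.1 == 0)).map (fun p => p.2)),
      ((tagged.filter (fun p => p.1 == 1)).map (fun p => p.2)),
      ((tagged.filter (fun p => p.1 == 2)).map (fun p => p.2))))
    = (metrics.filter (fun m => ["validity", "safety", "relevance"].contains m),
       metrics.filter (fun m => ["novelty", "diversity", "complexity"].contains m),
       metrics.filter (fun m =>
         !(["validity", "safety", "relevance"].contains m) && !(["novelty", "diversity", "complexity"].contains m))) := by
  simp only [show (PySem.Dict.ofList [("validity", 0), ("safety", 0), ("relevance", 0),
        ("novelty", 1), ("diversity", 1), ("complexity", 1)] : PySem.Dict String Nat)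
      = PySem.Dict.mk [("validity", 0), ("safety", 0), ("relevance", 0),
        ("novelty", 1), ("diversity", 1), ("complexity", 1)] from by decide]
  induction metrics with
  | nil => simp
  | cons m ms ih =>
    simp only [List.map_cons, List.filter_cons] at *
    by_cases h1 : (["validity", "safety", "relevance"].contains m) = true
    · rcases (by simpa using h1 : m = "validity" ∨ m = "safety" ∨ m = "relevance") with rfl | rfl | rfl <;>
        · simp only [Prod.mk.injEq] at ih
          simp only [PySem.Dict.getD, PySem.Dict.get?] at ih ⊢
          simp [ih.1, ih.2.1, ih.2.2]
    · by_cases h2 : (["novelty", "diversity", "complexity"].contains m) = true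
      · rcases (by simpa using h2 : m = "novelty" ∨ m = "diversity" ∨ m = "complexity") with rfl | rfl | rfl <;>
          · simp only [Prod.mk.injEq] at ih
            simp only [PySem.Dict.getD, PySem.Dict.get?] at ih ⊢
            simp [ih.1, ih.2.1, ih.2.2]
      · have h1' : ¬(m = "validity" ∨ m = "safety" ∨ m = "relevance") := by simpa using h1
        have h2' : ¬(m = "novelty" ∨ m = "diversity" ∨ m = "complexity") := by simpa using h2
        simp at h1' h2'
        simp only [Prod.mk.injEq] at ih
        simp only [PySem.Dict.getD, PySem.Dict.get?] at ih ⊢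
        simp [beq_iff_eq, ih.1, ih.2.1, ih.2.2,
              h1'.1, h1'.2.1, h1'.2.2, h2'.1, h2'.2.1, h2'.2.2,
              Ne.symm h1'.1, Ne.symm h1'.2.1, Ne.symm h1'.2.2,
              Ne.symm h2'.1, Ne.symm h2'.2.1, Ne.symm h2'.2.2]


-- ===== VERDICT =====
theorem design_evaluation_framework_py_spec : Claim_equal_design_evaluation_framework_py := by
  intro metrics _
  unfold Spec_design_evaluation_framework_py design_evaluation_framework_py design_evaluation_framework_py_alt
  simp only []
  rw [show (PySem.Dict.ofList [("primary_metrics", ([] : List String)), ("secondary_metrics", []),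
        ("research_metrics", []), ("statistical_tests", [])])
      = PySem.Dict.mk [("primary_metrics", []), ("secondary_metrics", []),
        ("research_metrics", []), ("statistical_tests", [])] from by decide]
  rw [PySem.Dict.ext (dispatch_loop_items metrics [] [] [] [])]
  have h := tagged_groups metrics
  simp only [Prod.mk.injEq] at h
  rw [← h.1, ← h.2.1, ← h.2.2]
  simp [PySem.Dict.insert, PySem.Dict.contains]
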